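-- pv_equiv track=rewrite | github.com/nosajmik/pytorch_DGCNN | make_acfg_clang.py | get_branch_type
-- ===== SOURCE A (Python) =====
-- def get_branch_type(insns):
--     '''
--     insns = result of calling get_disas_as_list on a basic block.
--     For branch type, let it be an integer, but one-hot encoded within
--     an 8-dimensional vector.
--     0 indicates simple and unconditional branch (B, BX, BR, RET).
--     1 indicates unconditional branch with link (used frequently for function
--       calls, since ARM has no dedicated CALL instruction unlike x86) (BL, BLX, BLR).
--     2 indicates compare- or test-and-branch w/o condition flag change
--       (CBZ, CBNZ, TBZ, TBNZ).
--     3 indicates conditional branch with no link (B/BX + {condition}).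
--     4 indicates conditional branch with link (BL/BLX + {condition}).
--     5 indicates POP.
--     6 indicates POP + {condition}.
--     7 indicates all others (miscellaneous).
--     '''
--     conds = {"eq", "ne", "cs", "hs", "cc", "lo", "mi", "pl", "vs", "vc",
--              "hi", "ls", "ge", "lt", "gt", "le"}
--     cb_no_link = {"b" + c for c in conds}.union({"bx" + c for c in conds})
--     cb_link = {"bl" + c for c in conds}.union({"blx" + c for c in conds})
--     br_opcode = insns[-1][1]
--
--     if br_opcode in {"cbz", "cbnz", "tbz", "tbnz"}:
--         return 2
--     elif br_opcode.startswith("pop"):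
--         if br_opcode == "pop":
--             return 5
--         else:
--             return 6
--     elif br_opcode.startswith("b"):
--         if br_opcode in {"b", "bx", "br"}:
--             return 0
--         elif br_opcode in {"bl", "blx", "blr"}:
--             return 1
--         elif br_opcode in cb_no_link:
--             return 3
--         elif br_opcode in cb_link:
--             return 4
--         else:
--             return 7
--     elif br_opcode == "ret":
--         return 0
--     else:
--         return 7
-- ===== SOURCE B (Python) =====
-- _CONDS = ("eq", "ne", "cs", "hs", "cc", "lo", "mi", "pl", "vs", "vc",
--           "hi", "ls", "ge", "lt", "gt", "le")
--
--
-- def _branch_table():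
--     # Every opcode with a fixed class goes into one lookup table.
--     t = {"cbz": 2, "cbnz": 2, "tbz": 2, "tbnz": 2,
--          "b": 0, "bx": 0, "br": 0, "ret": 0,
--          "bl": 1, "blx": 1, "blr": 1, "pop": 5}
--     for c in _CONDS:
--         t["b" + c] = 3
--         t["bx" + c] = 3
--         t["bl" + c] = 4
--         t["blx" + c] = 4
--     return t
--
--
-- _TABLE = _branch_table()
--
--
-- def get_branch_type(insns):
--     op = insns[-1][1]
--     v = _TABLE.get(op)
--     if v is not None:
--         return v
--     return 6 if op.startswith("pop") else 7
-- ===== Notes on version B (the rewrite author's own statement) =====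
-- stated objective: alternative
-- what changed: B replaces A's cascade of membership tests over per-call-built sets by a single precomputed opcode->class dictionary (76 entries) consulted once, with only the startswith('pop') conditional-pop case left as a fallback.
-- outside the precondition, e.g. on get_branch_type([]): A raises IndexError, B raises IndexError; on get_branch_type([['0x0']]): A raises IndexError, B raises IndexError
import Mathlib
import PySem

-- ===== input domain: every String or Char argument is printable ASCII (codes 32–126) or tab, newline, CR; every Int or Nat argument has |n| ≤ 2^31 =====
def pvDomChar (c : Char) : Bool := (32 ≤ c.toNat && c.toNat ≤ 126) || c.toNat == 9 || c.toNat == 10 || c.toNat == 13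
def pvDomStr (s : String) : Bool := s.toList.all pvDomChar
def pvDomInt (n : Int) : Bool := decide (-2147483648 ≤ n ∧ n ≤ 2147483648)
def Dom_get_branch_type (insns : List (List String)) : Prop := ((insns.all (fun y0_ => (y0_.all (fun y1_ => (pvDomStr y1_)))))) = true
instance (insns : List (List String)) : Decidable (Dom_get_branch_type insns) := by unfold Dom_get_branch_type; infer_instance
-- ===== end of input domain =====

-- B replaces A's cascade of membership tests (with per-call-built condition-suffix sets)
-- by one precomputed opcode->class dictionary consulted once, with a startswith("pop")
-- fallback for conditional pop (objective: alternative, table-driven dispatch).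


-- ===== PORT A =====
def pvConds : PySem.Set String :=
  PySem.Set.ofList ["eq", "ne", "cs", "hs", "cc", "lo", "mi", "pl", "vs", "vc",
                    "hi", "ls", "ge", "lt", "gt", "le"]

def pvCbNoLink : PySem.Set String :=
  PySem.Set.union (PySem.Set.ofList (pvConds.map (fun c => "b" ++ c)))
                  (PySem.Set.ofList (pvConds.map (fun c => "bx" ++ c)))

def pvCbLink : PySem.Set String :=
  PySem.Set.union (PySem.Set.ofList (pvConds.map (fun c => "bl" ++ c)))
                  (PySem.Set.ofList (pvConds.map (fun c => "blx" ++ c)))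

def pvClassifyA (br_opcode : String) : Int :=
  if PySem.Set.contains (PySem.Set.ofList ["cbz", "cbnz", "tbz", "tbnz"]) br_opcode then 2
  else if PySem.Str.startswith br_opcode "pop" then
    (if br_opcode == "pop" then 5 else 6)
  else if PySem.Str.startswith br_opcode "b" then
    (if PySem.Set.contains (PySem.Set.ofList ["b", "bx", "br"]) br_opcode then 0
     else if PySem.Set.contains (PySem.Set.ofList ["bl", "blx", "blr"]) br_opcode then 1
     else if PySem.Set.contains pvCbNoLink br_opcode then 3
     else if PySem.Set.contains pvCbLink br_opcode then 4
     else 7)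
  else if br_opcode == "ret" then 0
  else 7

-- insns[-1][1]: Python raises IndexError where either pyGet? is none (excluded by Pre_)
def get_branch_type (insns : List (List String)) : Int :=
  match PySem.List.pyGet? insns (-1) with
  | none => 0
  | some last =>
    match PySem.List.pyGet? last 1 with
    | none => 0
    | some br_opcode => pvClassifyA br_opcode

-- ===== PORT B =====
def pvCondsB : List String :=
  ["eq", "ne", "cs", "hs", "cc", "lo", "mi", "pl", "vs", "vc",
   "hi", "ls", "ge", "lt", "gt", "le"]

-- _branch_table(): base entries, then the loop over _CONDS adding b/bx/bl/blx + c
def pvBranchTable : PySem.Dict String Int :=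
  pvCondsB.foldl
    (fun t c =>
      ((((t.insert ("b" ++ c) 3).insert ("bx" ++ c) 3).insert ("bl" ++ c) 4).insert ("blx" ++ c) 4))
    (PySem.Dict.mk [("cbz", 2), ("cbnz", 2), ("tbz", 2), ("tbnz", 2),
                    ("b", 0), ("bx", 0), ("br", 0), ("ret", 0),
                    ("bl", 1), ("blx", 1), ("blr", 1), ("pop", 5)])

def pvClassifyB (op : String) : Int :=
  match PySem.Dict.get? pvBranchTable op with
  | some v => v
  | none => if PySem.Str.startswith op "pop" then 6 else 7

def get_branch_type_alt (insns : List (List String)) : Int :=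
  match PySem.List.pyGet? insns (-1) with
  | none => 0
  | some last =>
    match PySem.List.pyGet? last 1 with
    | none => 0
    | some op => pvClassifyB op

-- ===== PRECONDITION & SPEC =====
-- Pre_ excludes exactly the inputs where Python's insns[-1][1] raises an IndexError:
-- an empty insns, or a last instruction with fewer than 2 fields.
def Pre_get_branch_type (insns : List (List String)) : Prop :=
  insns ≠ [] ∧ 2 ≤ (insns.getLastD []).length
instance (insns : List (List String)) : Decidable (Pre_get_branch_type insns) := by
  unfold Pre_get_branch_type; infer_instance

def pvWitness_get_branch_type : List (List String) := [["0x100", "ble", "#0x104"]]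

def Spec_get_branch_type (insns : List (List String)) (out : Int) : Prop := out = get_branch_type_alt insns
instance (insns : List (List String)) (out : Int) : Decidable (Spec_get_branch_type insns out) := by unfold Spec_get_branch_type; infer_instance

-- ===== CLAIM (what is proved, stated in full; the proofs are below) =====
def Claim_equal_get_branch_type : Prop := ∀ (insns : List (List String)), Dom_get_branch_type insns → Pre_get_branch_type insns → Spec_get_branch_type insns (get_branch_type insns)

-- ===== LEMMAS AND PROOFS =====

def pvKeys : List String :=
  ["cbz", "cbnz", "tbz", "tbnz", "b", "bx", "br", "ret", "bl", "blx", "blr", "pop",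
   "beq", "bxeq", "bleq", "blxeq", "bne", "bxne", "blne", "blxne",
   "bcs", "bxcs", "blcs", "blxcs", "bhs", "bxhs", "blhs", "blxhs",
   "bcc", "bxcc", "blcc", "blxcc", "blo", "bxlo", "bllo", "blxlo",
   "bmi", "bxmi", "blmi", "blxmi", "bpl", "bxpl", "blpl", "blxpl",
   "bvs", "bxvs", "blvs", "blxvs", "bvc", "bxvc", "blvc", "blxvc",
   "bhi", "bxhi", "blhi", "blxhi", "bls", "bxls", "blls", "blxls",
   "bge", "bxge", "blge", "blxge", "blt", "bxlt", "bllt", "blxlt",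
   "bgt", "bxgt", "blgt", "blxgt", "ble", "bxle", "blle", "blxle"]

set_option maxRecDepth 20000 in
theorem pvTableKeys : PySem.Dict.keys pvBranchTable = pvKeys := by decide

-- on every key of the table, A's classifier and B's lookup agree
set_option maxRecDepth 20000 in
theorem pvMemberCase : ∀ op ∈ pvKeys, pvClassifyA op = pvClassifyB op := by decide

theorem pvCbNoLink_eq : pvCbNoLink =
    ["beq","bne","bcs","bhs","bcc","blo","bmi","bpl","bvs","bvc","bhi","bls","bge","blt","bgt","ble",
     "bxeq","bxne","bxcs","bxhs","bxcc","bxlo","bxmi","bxpl","bxvs","bxvc","bxhi","bxls","bxge","bxlt","bxgt","bxle"] := by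
  decide

theorem pvCbLink_eq : pvCbLink =
    ["bleq","blne","blcs","blhs","blcc","bllo","blmi","blpl","blvs","blvc","blhi","blls","blge","bllt","blgt","blle",
     "blxeq","blxne","blxcs","blxhs","blxcc","blxlo","blxmi","blxpl","blxvs","blxvc","blxhi","blxls","blxge","blxlt","blxgt","blxle"] := by
  decide

theorem pvNonMemberCase (op : String) (hm : op ∉ pvKeys) : pvClassifyA op = pvClassifyB op := by
  have hget : PySem.Dict.get? pvBranchTable op = none := by
    rw [PySem.Dict.get?_eq_none_iff_not_mem_keys, pvTableKeys]; exact hm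
  have hc : ∀ (L : List String), (∀ x ∈ L, x ∈ pvKeys) → PySem.Set.contains L op = false := by
    intro L hs
    rw [Bool.eq_false_iff]
    intro h
    exact hm (hs op ((PySem.Set.contains_iff L op).mp h))
  have n_pop : (op == "pop") = false := by
    rw [beq_eq_false_iff_ne]; intro h; exact hm (h ▸ (by decide : ("pop" : String) ∈ pvKeys))
  have n_ret : (op == "ret") = false := by
    rw [beq_eq_false_iff_ne]; intro h; exact hm (h ▸ (by decide : ("ret" : String) ∈ pvKeys))
  have hA : pvClassifyA op = if PySem.Str.startswith op "pop" then 6 else 7 := by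
    unfold pvClassifyA
    rw [pvCbNoLink_eq, pvCbLink_eq,
        hc _ (by decide), hc _ (by decide), hc _ (by decide), hc _ (by decide), hc _ (by decide),
        n_pop, n_ret]
    simp
  unfold pvClassifyB
  rw [hget, hA]

theorem pvClassifyEq (op : String) : pvClassifyA op = pvClassifyB op := by
  by_cases hm : op ∈ pvKeys
  · exact pvMemberCase op hm
  · exact pvNonMemberCase op hm

-- ===== VERDICT (by name: the statement is the Claim_ definition above) =====
theorem get_branch_type_spec : Claim_equal_get_branch_type := by
  intro insns _ _
  show get_branch_type insns = get_branch_type_alt insns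
  cases h1 : PySem.List.pyGet? insns (-1) with
  | none => simp [get_branch_type, get_branch_type_alt, h1]
  | some last =>
    cases h2 : PySem.List.pyGet? last 1 with
    | none => simp [get_branch_type, get_branch_type_alt, h1, h2]
    | some op => simp [get_branch_type, get_branch_type_alt, h1, h2, pvClassifyEq op]
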